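-- pv_equiv track=rewrite | github.com/Kennedh/CodeWars | Points On A Line.py | on_line
-- ===== SOURCE A (Python) =====
-- def on_line(points):
--     if len(points) <= 2:
--         return True
--
--     x0, y0 = points[0]
--     base_found = False
--     for i in range(1, len(points)):
--         x1, y1 = points[i]
--         if (x1, y1) != (x0, y0):
--             base_found = True
--             break
--
--     if not base_found:
--         return True
--
--     for x, y in points:
--         if (y1 - y0) * (x - x0) != (y - y0) * (x1 - x0):
--             return False
--     return True
-- ===== SOURCE B (Python) =====
-- def _gcd(a, b):
--     a, b = abs(a), abs(b)
--     while b: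
--         a, b = b, a % b
--     return a
--
-- def on_line(points):
--     if len(points) <= 2:
--         return True
--     x0, y0 = points[0]
--     dirs = set()
--     for x, y in points:
--         dx, dy = x - x0, y - y0
--         if dx == 0 and dy == 0:
--             continue
--         if dx < 0 or (dx == 0 and dy < 0):
--             dx, dy = -dx, -dy
--         g = _gcd(dx, dy)
--         dirs.add((dx // g, dy // g))
--     return len(dirs) <= 1
-- ===== Notes on version B (the rewrite author's own statement) =====
-- stated objective: alternative
-- what changed: Replaces A's two-phase scan (find a base point, then re-scan testing cross products against it) by a single pass that canonicalizes every direction vector (sign-normalized, gcd-reduced) into a set and returns True iff the set has at most one element.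
import Mathlib
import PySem

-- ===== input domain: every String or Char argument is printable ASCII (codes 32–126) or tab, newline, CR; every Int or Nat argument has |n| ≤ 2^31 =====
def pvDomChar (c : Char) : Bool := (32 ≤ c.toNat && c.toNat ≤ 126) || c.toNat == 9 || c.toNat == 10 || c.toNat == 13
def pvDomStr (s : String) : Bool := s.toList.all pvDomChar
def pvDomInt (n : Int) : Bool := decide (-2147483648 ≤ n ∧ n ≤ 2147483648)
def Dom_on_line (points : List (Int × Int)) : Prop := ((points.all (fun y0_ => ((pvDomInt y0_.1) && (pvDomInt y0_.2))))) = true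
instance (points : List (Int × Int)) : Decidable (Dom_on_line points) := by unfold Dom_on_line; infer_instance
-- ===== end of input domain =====

-- B replaces A's two-phase scan (find a base point, then re-scan testing cross products against
-- it) by one pass inserting canonical (sign-normalized, gcd-reduced) direction vectors into a set;
-- alternative algorithm of similar cost.

-- ===== PORT A =====
-- A's base-finding loop over indices 1..len-1: first point different from (x0, y0)
def findDiff (x0 y0 : Int) : List (Int × Int) → Option (Int × Int)
  | [] => none
  | (x1, y1) :: rest =>
      if (x1, y1) ≠ (x0, y0) then some (x1, y1) else findDiff x0 y0 rest

def on_line (points : List (Int × Int)) : Bool :=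
  if points.length ≤ 2 then true
  else
    match points with
    | [] => true
    | (x0, y0) :: rest =>
      match findDiff x0 y0 rest with
      | none => true
      | some (x1, y1) =>
          points.all (fun p => decide ((y1 - y0) * (p.1 - x0) = (p.2 - y0) * (x1 - x0)))

-- ===== PORT B =====
-- Source B's hand-written Euclid `_gcd` on absolute values
def gcdLoop : Nat → Nat → Nat
  | a, 0 => a
  | a, (b+1) => gcdLoop (b+1) (a % (b+1))
termination_by a b => b
decreasing_by exact Nat.mod_lt _ (Nat.succ_pos b)

def pyGcd (a b : Int) : Int := (gcdLoop a.natAbs b.natAbs : Nat)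

-- canonical form of a nonzero direction vector, exactly as in Source B's loop body
def canon (dx dy : Int) : Int × Int :=
  let p : Int × Int := if dx < 0 ∨ (dx = 0 ∧ dy < 0) then (-dx, -dy) else (dx, dy)
  let g : Int := pyGcd p.1 p.2
  (PySem.Int.floordiv p.1 g, PySem.Int.floordiv p.2 g)

def on_line_alt (points : List (Int × Int)) : Bool :=
  if points.length ≤ 2 then true
  else
    match points with
    | [] => true
    | (x0, y0) :: _ =>
      let dirs : PySem.Set (Int × Int) := points.foldl
        (fun s p =>
          let dx := p.1 - x0
          let dy := p.2 - y0
          if dx = 0 ∧ dy = 0 then s else PySem.Set.add s (canon dx dy))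
        PySem.Set.empty
      decide (dirs.length ≤ 1)

-- ===== PRECONDITION & SPEC =====
def Spec_on_line (points : List (Int × Int)) (out : Bool) : Prop := out = on_line_alt points
instance (points : List (Int × Int)) (out : Bool) : Decidable (Spec_on_line points out) := by unfold Spec_on_line; infer_instance

-- ===== CLAIM (what is proved, stated in full; the proofs are below) =====
def Claim_equal_on_line : Prop := ∀ (points : List (Int × Int)), Dom_on_line points → Spec_on_line points (on_line points)

-- ===== LEMMAS AND PROOFS =====

theorem gcdLoop_eq (a b : Nat) : gcdLoop a b = Nat.gcd a b := by
  induction b using Nat.strong_induction_on generalizing a with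
  | _ b ih =>
    match b with
    | 0 => simp [gcdLoop]
    | Nat.succ b =>
      rw [gcdLoop, ih _ (Nat.mod_lt _ (Nat.succ_pos b))]
      rw [Nat.gcd_comm (b+1)]
      conv_rhs => rw [Nat.gcd_comm, Nat.gcd_rec]

theorem pyGcd_eq (a b : Int) : pyGcd a b = (Int.gcd a b : Int) := by
  unfold pyGcd
  rw [gcdLoop_eq]
  rfl

theorem normQuot_eq_iff (a b c d : Int) (ha : 0 ≤ a) (hb : a = 0 → 0 < b)
    (hc : 0 ≤ c) (hd : c = 0 → 0 < d) :
    ((a / (Int.gcd a b : Int), b / (Int.gcd a b : Int)) =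
     (c / (Int.gcd c d : Int), d / (Int.gcd c d : Int))) ↔ a * d = b * c := by
  have hunz : a ≠ 0 ∨ b ≠ 0 := by
    by_cases h : a = 0
    · exact Or.inr (ne_of_gt (hb h))
    · exact Or.inl h
  have hvnz : c ≠ 0 ∨ d ≠ 0 := by
    by_cases h : c = 0
    · exact Or.inr (ne_of_gt (hd h))
    · exact Or.inl h
  have hg : 0 < Int.gcd a b := Int.gcd_pos_iff.mpr hunz
  have hh : 0 < Int.gcd c d := Int.gcd_pos_iff.mpr hvnz
  set g : Int := (Int.gcd a b : Int) with hgdef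
  set h : Int := (Int.gcd c d : Int) with hhdef
  have hg0 : 0 < g := by rw [hgdef]; exact_mod_cast hg
  have hh0 : 0 < h := by rw [hhdef]; exact_mod_cast hh
  have hga : g ∣ a := hgdef ▸ Int.gcd_dvd_left a b
  have hgb : g ∣ b := hgdef ▸ Int.gcd_dvd_right a b
  have hhc : h ∣ c := hhdef ▸ Int.gcd_dvd_left c d
  have hhd : h ∣ d := hhdef ▸ Int.gcd_dvd_right c d
  have ea : a / g * g = a := Int.ediv_mul_cancel hga
  have eb : b / g * g = b := Int.ediv_mul_cancel hgb
  have ec : c / h * h = c := Int.ediv_mul_cancel hhc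
  have ed : d / h * h = d := Int.ediv_mul_cancel hhd
  constructor
  · rintro hpq
    have h1 : a / g = c / h := (Prod.ext_iff.mp hpq).1
    have h2 : b / g = d / h := (Prod.ext_iff.mp hpq).2
    calc a * d = (a / g * g) * (d / h * h) := by rw [ea, ed]
    _ = (b / g * g) * (c / h * h) := by rw [h1, h2]; ring
    _ = b * c := by rw [eb, ec]
  · intro hcross
    have hcop1 : IsCoprime (a / g) (b / g) :=
      Int.isCoprime_iff_gcd_eq_one.mpr (Int.gcd_div_gcd_div_gcd hg)
    have hcop2 : IsCoprime (c / h) (d / h) :=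
      Int.isCoprime_iff_gcd_eq_one.mpr (Int.gcd_div_gcd_div_gcd hh)
    have hred : (a / g) * (d / h) = (b / g) * (c / h) := by
      have : ((a / g) * (d / h)) * (g * h) = ((b / g) * (c / h)) * (g * h) := by
        calc ((a / g) * (d / h)) * (g * h) = (a / g * g) * (d / h * h) := by ring
        _ = a * d := by rw [ea, ed]
        _ = b * c := hcross
        _ = (b / g * g) * (c / h * h) := by rw [eb, ec]
        _ = ((b / g) * (c / h)) * (g * h) := by ring
      exact mul_right_cancel₀ (by positivity) this
    by_cases ha0 : a = 0
    · have hb0 : 0 < b := hb ha0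
      have hc0 : c = 0 := by
        have : b * c = 0 := by rw [← hcross, ha0]; ring
        rcases mul_eq_zero.mp this with h' | h'
        · exact absurd h' (ne_of_gt hb0)
        · exact h'
      have hd0 : 0 < d := hd hc0
      have hgb' : g = b := by
        rw [hgdef, ha0, Int.gcd_zero_left]
        exact (Int.natAbs_of_nonneg (le_of_lt hb0)).symm ▸ rfl
      have hhd' : h = d := by
        rw [hhdef, hc0, Int.gcd_zero_left]
        exact (Int.natAbs_of_nonneg (le_of_lt hd0)).symm ▸ rfl
      rw [ha0, hc0, hgb', hhd', Int.zero_ediv, Int.zero_ediv, Int.ediv_self (ne_of_gt hb0),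
        Int.ediv_self (ne_of_gt hd0)]
    · have ha0' : 0 < a := lt_of_le_of_ne ha (Ne.symm ha0)
      have hc0 : 0 < c := by
        rcases lt_or_eq_of_le hc with h' | h'
        · exact h'
        · exfalso
          have hd0 : 0 < d := hd h'.symm
          have : a * d = 0 := by rw [hcross, ← h']; ring
          rcases mul_eq_zero.mp this with h'' | h''
          · exact ha0 h''
          · exact (ne_of_gt hd0) h''
      have ha1 : 0 < a / g := Int.ediv_pos_of_pos_of_dvd ha0' (le_of_lt hg0) hga
      have hc1 : 0 < c / h := Int.ediv_pos_of_pos_of_dvd hc0 (le_of_lt hh0) hhc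
      have hd1 : (a / g) ∣ (b / g) * (c / h) := ⟨d / h, by linarith [hred]⟩
      have hd2 : (c / h) ∣ (b / g) * (c / h) := Dvd.intro_left _ rfl
      have hac : (a / g) ∣ (c / h) := hcop1.dvd_of_dvd_mul_left hd1
      have hca : (c / h) ∣ (a / g) := by
        have : (c / h) ∣ (a / g) * (d / h) := by
          rw [hred]; exact Dvd.intro_left _ rfl
        exact hcop2.dvd_of_dvd_mul_right this
      have heq1 : a / g = c / h := Int.dvd_antisymm (le_of_lt ha1) (le_of_lt hc1) hac hca
      have heq2 : b / g = d / h := by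
        have : (a / g) * (d / h) = (a / g) * (b / g) := by rw [hred, heq1]; ring
        have := mul_left_cancel₀ (ne_of_gt ha1) this
        omega
      rw [heq1, heq2]

theorem canon_eval (a b : Int) (hnz : ¬(a = 0 ∧ b = 0)) :
    canon a b = (if a < 0 ∨ (a = 0 ∧ b < 0) then
        ((-a) / (Int.gcd (-a) (-b) : Int), (-b) / (Int.gcd (-a) (-b) : Int))
      else (a / (Int.gcd a b : Int), b / (Int.gcd a b : Int))) := by
  by_cases hf : a < 0 ∨ (a = 0 ∧ b < 0)
  · have hpos : (0 : Int) < (Int.gcd (-a) (-b) : Int) := by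
      have : 0 < Int.gcd (-a) (-b) := Int.gcd_pos_iff.mpr (by omega)
      exact_mod_cast this
    simp only [canon, hf, if_pos, pyGcd_eq]
    simp only [PySem.Int.floordiv_eq_ediv_of_pos hpos]
  · have hpos : (0 : Int) < (Int.gcd a b : Int) := by
      have : 0 < Int.gcd a b := Int.gcd_pos_iff.mpr (by omega)
      exact_mod_cast this
    simp only [canon, pyGcd_eq]
    rw [if_neg hf, if_neg hf]
    simp only [PySem.Int.floordiv_eq_ediv_of_pos hpos]

theorem canon_eq_iff {a b c d : Int} (hu : ¬(a = 0 ∧ b = 0)) (hv : ¬(c = 0 ∧ d = 0)) :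
    canon a b = canon c d ↔ a * d = b * c := by
  obtain ⟨a', b', ha', hb', hcu, hXu⟩ : ∃ a' b' : Int, 0 ≤ a' ∧ (a' = 0 → 0 < b') ∧
      canon a b = (a' / (Int.gcd a' b' : Int), b' / (Int.gcd a' b' : Int)) ∧
      (∀ X Y : Int, a' * Y = b' * X ↔ a * Y = b * X) := by
    by_cases hf : a < 0 ∨ (a = 0 ∧ b < 0)
    · refine ⟨-a, -b, by omega, by omega, by rw [canon_eval a b hu, if_pos hf], ?_⟩
      intro X Y
      constructor <;> intro h <;> nlinarith [h]
    · refine ⟨a, b, by omega, by omega, by rw [canon_eval a b hu, if_neg hf], ?_⟩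
      intro X Y
      exact Iff.rfl
  obtain ⟨c', d', hc', hd', hcv, hXv⟩ : ∃ c' d' : Int, 0 ≤ c' ∧ (c' = 0 → 0 < d') ∧
      canon c d = (c' / (Int.gcd c' d' : Int), d' / (Int.gcd c' d' : Int)) ∧
      (∀ X Y : Int, X * d' = Y * c' ↔ X * d = Y * c) := by
    by_cases hf : c < 0 ∨ (c = 0 ∧ d < 0)
    · refine ⟨-c, -d, by omega, by omega, by rw [canon_eval c d hv, if_pos hf], ?_⟩
      intro X Y
      constructor <;> intro h <;> nlinarith [h]
    · refine ⟨c, d, by omega, by omega, by rw [canon_eval c d hv, if_neg hf], ?_⟩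
      intro X Y
      exact Iff.rfl
  rw [hcu, hcv, normQuot_eq_iff a' b' c' d' ha' hb' hc' hd']
  constructor
  · intro h
    exact (hXv a b).mp (((hXu c' d').mp h).symm ▸ ((hXu c' d').mp h))
  · intro h
    exact (hXu c' d').mpr (by
      have := (hXv a b).mpr h
      linarith [this])

-- the canonical directions B inserts, as a plain list

theorem findDiff_none {x0 y0 : Int} {l : List (Int × Int)} :
    findDiff x0 y0 l = none ↔ ∀ p ∈ l, p = (x0, y0) := by
  induction l with
  | nil => simp [findDiff]
  | cons p rest ih =>
    obtain ⟨x1, y1⟩ := p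
    by_cases h : (x1, y1) = (x0, y0)
    · simp [findDiff, h, ih]
    · simp [findDiff, h]

theorem findDiff_some {x0 y0 : Int} {l : List (Int × Int)} {q : Int × Int}
    (h : findDiff x0 y0 l = some q) : q ∈ l ∧ q ≠ (x0, y0) := by
  induction l with
  | nil => simp [findDiff] at h
  | cons p rest ih =>
    obtain ⟨x1, y1⟩ := p
    by_cases hp : (x1, y1) = (x0, y0)
    · simp [findDiff, hp] at h
      rcases ih h with ⟨h1, h2⟩
      exact ⟨List.mem_cons_of_mem _ h1, h2⟩
    · simp [findDiff, hp] at h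
      subst h
      exact ⟨List.mem_cons_self, hp⟩

def canons (x0 y0 : Int) (l : List (Int × Int)) : List (Int × Int) :=
  (l.filter (fun p => !(decide (p.1 - x0 = 0 ∧ p.2 - y0 = 0)))).map
    (fun p => canon (p.1 - x0) (p.2 - y0))

theorem foldl_step_eq (x0 y0 : Int) (l : List (Int × Int)) (s : PySem.Set (Int × Int)) :
    l.foldl (fun s p =>
        let dx := p.1 - x0
        let dy := p.2 - y0
        if dx = 0 ∧ dy = 0 then s else PySem.Set.add s (canon dx dy)) s
      = (canons x0 y0 l).foldl PySem.Set.add s := by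
  induction l generalizing s with
  | nil => rfl
  | cons p rest ih =>
    by_cases hz : p.1 - x0 = 0 ∧ p.2 - y0 = 0
    · simp only [canons, List.foldl_cons, List.filter_cons, hz, decide_true, Bool.not_true,
        if_pos hz]
      simpa [canons] using ih s
    · simp only [canons, List.foldl_cons, List.filter_cons, hz, decide_false, Bool.not_false,
        if_neg hz, List.map_cons]
      simpa [canons] using ih (PySem.Set.add s (canon (p.1 - x0) (p.2 - y0)))

theorem mem_foldl_add {α : Type} [BEq α] [LawfulBEq α] (l : List α) (s : PySem.Set α) (x : α) :
    x ∈ l.foldl PySem.Set.add s ↔ x ∈ s ∨ x ∈ l := by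
  induction l generalizing s with
  | nil => simp
  | cons a rest ih =>
    simp only [List.foldl_cons, ih, PySem.Set.mem_add, List.mem_cons]
    tauto

theorem nodup_foldl_add {α : Type} [BEq α] [LawfulBEq α] (l : List α) (s : PySem.Set α)
    (hs : s.Nodup) : (l.foldl PySem.Set.add s).Nodup := by
  induction l generalizing s with
  | nil => exact hs
  | cons a rest ih => exact ih _ (PySem.Set.nodup_add s a hs)

theorem len_le_one_iff {α : Type} [BEq α] [LawfulBEq α] (ys : List α) :
    (ys.foldl PySem.Set.add PySem.Set.empty).length ≤ 1 ↔ ∀ x ∈ ys, ∀ y ∈ ys, x = y := by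
  have hmem : ∀ x, x ∈ ys.foldl PySem.Set.add PySem.Set.empty ↔ x ∈ ys := by
    intro x
    rw [mem_foldl_add]
    simp [PySem.Set.empty]
  have hnd : (ys.foldl PySem.Set.add PySem.Set.empty).Nodup :=
    nodup_foldl_add ys _ (by simp [PySem.Set.empty])
  constructor
  · intro hlen x hx y hy
    match hd : ys.foldl PySem.Set.add PySem.Set.empty with
    | [] =>
      rw [hd] at hmem
      exact absurd ((hmem x).mpr hx) (by simp)
    | [e] =>
      rw [hd] at hmem
      have h1 := (hmem x).mpr hx
      have h2 := (hmem y).mpr hy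
      simp at h1 h2
      rw [h1, h2]
    | e1 :: e2 :: t =>
      rw [hd] at hlen
      simp at hlen
  · intro hall
    match hd : ys.foldl PySem.Set.add PySem.Set.empty with
    | [] => simp
    | [e] => simp
    | e1 :: e2 :: t =>
      exfalso
      rw [hd] at hmem hnd
      have h1 : e1 ∈ ys := (hmem e1).mp (by simp)
      have h2 : e2 ∈ ys := (hmem e2).mp (by simp)
      have := hall e1 h1 e2 h2
      simp [this] at hnd

theorem main_eq (points : List (Int × Int)) : on_line points = on_line_alt points := by
  by_cases hlen : points.length ≤ 2
  · simp [on_line, on_line_alt, hlen]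
  · match points with
    | [] => simp at hlen
    | (x0, y0) :: rest =>
      rw [on_line, on_line_alt, if_neg hlen, if_neg hlen]
      simp only
      rw [foldl_step_eq]
      have hBiff := len_le_one_iff (canons x0 y0 ((x0, y0) :: rest))
      -- membership description of canons
      have hcmem : ∀ u, u ∈ canons x0 y0 ((x0, y0) :: rest) ↔
          ∃ p ∈ (x0, y0) :: rest, ¬(p.1 - x0 = 0 ∧ p.2 - y0 = 0) ∧
            u = canon (p.1 - x0) (p.2 - y0) := by
        intro u
        simp only [canons, List.mem_map, List.mem_filter]
        constructor
        · rintro ⟨p, ⟨hp, hnz⟩, rfl⟩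
          exact ⟨p, hp, by simp at hnz ⊢; tauto, rfl⟩
        · rintro ⟨p, hp, hnz, rfl⟩
          exact ⟨p, ⟨hp, by simp at hnz ⊢; tauto⟩, rfl⟩
      cases hfd : findDiff x0 y0 rest with
      | none =>
        -- all points equal the anchor: no directions at all
        have hall := findDiff_none.mp hfd
        have hempty : canons x0 y0 ((x0, y0) :: rest) = [] := by
          simp only [canons, List.map_eq_nil_iff, List.filter_eq_nil_iff]
          intro p hp
          rcases List.mem_cons.mp hp with h | h
          · subst h; simp
          · have := hall p h; subst this; simp
        rw [hempty]
        simp [PySem.Set.empty]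
      | some q =>
        obtain ⟨x1, y1⟩ := q
        obtain ⟨hq_mem, hq_ne⟩ := findDiff_some hfd
        have hv1 : ¬(x1 - x0 = 0 ∧ y1 - y0 = 0) := by
          intro ⟨h1, h2⟩
          exact hq_ne (by
            have : x1 = x0 := by omega
            have : y1 = y0 := by omega
            simp_all)
        have hv1mem : canon (x1 - x0) (y1 - y0) ∈ canons x0 y0 ((x0, y0) :: rest) :=
          (hcmem _).mpr ⟨(x1, y1), List.mem_cons_of_mem _ hq_mem, hv1, rfl⟩
        rw [Bool.eq_iff_iff]
        simp only [List.all_eq_true, decide_eq_true_eq]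
        rw [hBiff]
        constructor
        · -- all cross products vanish → all canonical directions coincide
          intro hP u hu v hv
          obtain ⟨p, hp, hpnz, rfl⟩ := (hcmem u).mp hu
          obtain ⟨q, hq, hqnz, rfl⟩ := (hcmem v).mp hv
          have h1 : canon (p.1 - x0) (p.2 - y0) = canon (x1 - x0) (y1 - y0) := by
            rw [canon_eq_iff hpnz hv1]
            have := hP p hp
            linarith
          have h2 : canon (q.1 - x0) (q.2 - y0) = canon (x1 - x0) (y1 - y0) := by
            rw [canon_eq_iff hqnz hv1]
            have := hP q hq
            linarith
          rw [h1, h2]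
        · -- all canonical directions coincide → every point passes A's test
          intro hQ p hp
          by_cases hz : p.1 - x0 = 0 ∧ p.2 - y0 = 0
          · obtain ⟨h1, h2⟩ := hz
            rw [h1, h2]
            ring
          · have hpm : canon (p.1 - x0) (p.2 - y0) ∈ canons x0 y0 ((x0, y0) :: rest) :=
              (hcmem _).mpr ⟨p, hp, hz, rfl⟩
            have := hQ _ hpm _ hv1mem
            rw [canon_eq_iff hz hv1] at this
            linarith

-- ===== VERDICT (by name: the statement is the Claim_ definition above) =====
theorem on_line_spec : Claim_equal_on_line := by
  intro points _
  unfold Spec_on_line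
  exact main_eq points
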